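-- pv_equiv track=rewrite | github.com/tasandy/sideProjects | Python Tutorial/WaterlooOnline.py | equal
-- ===== SOURCE A (Python) =====
-- def equal(one, two):
--     if len(one) == len(two) == 0:
--         return True
--     elif len(one) == 0 or len(two) == 0:
--         return False
--     else:
--         return one[0] == two[0] and \
--                equal(one[1:], two[1:])
-- ===== SOURCE B (Python) =====
-- def equal(one, two):
--     if len(one) != len(two):
--         return False
--     for i in range(len(one)):
--         if one[i] != two[i]:
--             return False
--     return True
-- ===== Notes on version B (the rewrite author's own statement) =====
-- stated objective: simpler
-- what changed: Replaces A's head/tail slicing recursion (which copies both list tails at every step) with an explicit length guard followed by a flat index loop.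
import Mathlib
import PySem

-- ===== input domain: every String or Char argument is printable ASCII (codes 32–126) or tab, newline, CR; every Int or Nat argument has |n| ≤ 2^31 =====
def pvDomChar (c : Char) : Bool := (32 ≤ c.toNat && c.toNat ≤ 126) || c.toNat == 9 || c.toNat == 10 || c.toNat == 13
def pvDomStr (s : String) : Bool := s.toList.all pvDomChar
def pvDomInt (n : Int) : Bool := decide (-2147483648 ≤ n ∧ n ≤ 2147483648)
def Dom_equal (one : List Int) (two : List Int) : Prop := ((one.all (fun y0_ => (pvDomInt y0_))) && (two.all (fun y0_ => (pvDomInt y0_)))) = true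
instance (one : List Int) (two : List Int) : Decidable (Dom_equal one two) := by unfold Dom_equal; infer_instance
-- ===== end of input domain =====

-- B replaces A's head/tail slicing recursion with a length guard plus a flat index scan (simpler, avoids tail copies).


-- ===== PORT A =====
-- A: if both empty → True; if exactly one empty → False; else compare heads and recurse on the tails (one[1:] = slice from 1).
def equal (one : List Int) (two : List Int) : Bool :=
  if one.length = 0 ∧ two.length = 0 then true
  else if one.length = 0 ∨ two.length = 0 then false
  else (PySem.List.pyGetD one 0 0 == PySem.List.pyGetD two 0 0)
       && equal (PySem.List.slice one (some 1) none) (PySem.List.slice two (some 1) none)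
termination_by one.length
decreasing_by
  rw [PySem.List.slice_from one (by omega : (0:Int) ≤ 1)]
  simp
  omega

-- ===== PORT B =====
-- B: length guard, then a left-to-right index scan returning False at the first mismatch.
def equalAltLoop (one two : List Int) : List Nat → Bool
  | [] => true
  | i :: rest =>
    if PySem.List.pyGetD one (i : Int) 0 ≠ PySem.List.pyGetD two (i : Int) 0 then false
    else equalAltLoop one two rest

def equal_alt (one : List Int) (two : List Int) : Bool :=
  if one.length ≠ two.length then false
  else equalAltLoop one two (List.range one.length)

-- ===== PRECONDITION & SPEC =====
def Spec_equal (one : List Int) (two : List Int) (out : Bool) : Prop := out = equal_alt one two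
instance (one : List Int) (two : List Int) (out : Bool) : Decidable (Spec_equal one two out) := by unfold Spec_equal; infer_instance

-- ===== CLAIM (what is proved, stated in full; the proofs are below) =====
def Claim_equal_equal : Prop := ∀ (one : List Int) (two : List Int), Dom_equal one two → Spec_equal one two (equal one two)

-- ===== LEMMAS AND PROOFS =====

-- A decides list equality.
lemma equal_eq_beq (one two : List Int) : equal one two = (one == two) := by
  induction one generalizing two with
  | nil =>
    cases two <;> (rw [equal.eq_def]; simp)
  | cons a as ih =>
    cases two with
    | nil =>
      rw [equal.eq_def]; simp
    | cons b bs =>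
      rw [equal.eq_def]
      simp [pysem, ih]

-- B's loop over a suffix of indices: true iff all those positions agree.
lemma equalAltLoop_eq (one two : List Int) (is : List Nat) :
    equalAltLoop one two is
      = is.all (fun i => PySem.List.pyGetD one (i : Int) 0 == PySem.List.pyGetD two (i : Int) 0) := by
  induction is with
  | nil => rfl
  | cons i rest ih =>
    rw [equalAltLoop, ih]
    by_cases h : PySem.List.pyGetD one (i : Int) 0 = PySem.List.pyGetD two (i : Int) 0
    · rw [if_neg (fun hc => hc h)]
      rw [List.all_cons,
        show (PySem.List.pyGetD one (i : Int) 0 == PySem.List.pyGetD two (i : Int) 0) = true from by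
          simp only [beq_iff_eq]; exact h,
        Bool.true_and]
    · rw [if_pos h]
      rw [List.all_cons,
        show (PySem.List.pyGetD one (i : Int) 0 == PySem.List.pyGetD two (i : Int) 0) = false from by
          simp only [beq_eq_false_iff_ne, ne_eq]; exact h,
        Bool.false_and]

lemma equal_alt_eq_beq (one two : List Int) : equal_alt one two = (one == two) := by
  unfold equal_alt
  by_cases hlen : one.length = two.length
  · rw [if_neg (fun hc => hc hlen), equalAltLoop_eq]
    by_cases h : one = two
    · simp [h]
    · rw [show (one == two) = false by simp [h]]
      rw [List.all_eq_false]
      by_contra hc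
      push_neg at hc
      apply h
      apply List.ext_getElem hlen
      intro i h1 h2
      have := hc i (List.mem_range.mpr h1)
      rw [PySem.List.pyGetD_natCast, PySem.List.pyGetD_natCast] at this
      simpa [List.getD, h1, h2, List.getElem?_eq_getElem] using this
  · have : one ≠ two := fun h => hlen (by rw [h])
    simp [hlen, this]

-- ===== VERDICT (by name: the statement is the Claim_ definition above) =====
theorem equal_spec : Claim_equal_equal := by
  intro one two _
  unfold Spec_equal
  rw [equal_eq_beq, equal_alt_eq_beq]
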